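-- pv_equiv track=rewrite | github.com/xcthomaswagner/agent-harness | services/l1_preprocessing/tracer.py | _find_run_start_idx
-- ===== SOURCE A (Python) =====
-- from typing import Any
--
-- def _find_run_start_idx(entries: list[dict[str, Any]]) -> int:
--     """Find the index of the last pipeline run boundary.
--
--     A valid run boundary is a webhook_received or "Pipeline started" event
--     that is followed by either agent-written entries (pipeline.jsonl via
--     live trace) or L1 processing_started. Webhooks that were dedup-skipped
--     (no subsequent processing) are NOT run boundaries.
--     """
--     # Candidate boundary indices
--     candidates: list[int] = []
--     for i, e in enumerate(entries):
--         ev = e.get("event", "")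
--         if "Pipeline started" in ev or "webhook_received" in ev:
--             candidates.append(i)
--
--     if not candidates:
--         return 0
--
--     # Walk candidates from latest to earliest, pick the first one that has
--     # agent entries OR processing_started/Pipeline complete after it
--     for idx in reversed(candidates):
--         for j in range(idx + 1, len(entries)):
--             after = entries[j]
--             if after.get("source") == "agent":
--                 return idx
--             ev = after.get("event", "")
--             if ev == "processing_started" or "Pipeline" in ev:
--                 return idx
--     # Fallback: use newest candidate (most likely the current run)
--     return candidates[-1]
-- ===== SOURCE B (Python) =====
-- def _find_run_start_idx(entries: list) -> int:
--     """Two flat passes: find the last index M of an entry that evidences processing,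
--     then return the latest boundary candidate strictly before M (fallbacks as in the spec)."""
--     M = -1  # last index whose entry counts as 'processing after a boundary'
--     for i, e in enumerate(entries):
--         ev = e.get("event", "")
--         if e.get("source") == "agent" or ev == "processing_started" or "Pipeline" in ev:
--             M = i
--     last_cand = -1
--     best = -1
--     for i, e in enumerate(entries):
--         ev = e.get("event", "")
--         if "Pipeline started" in ev or "webhook_received" in ev:
--             last_cand = i
--             if i < M:
--                 best = i
--     if last_cand == -1:
--         return 0
--     return best if best != -1 else last_cand
-- ===== Notes on version B (the rewrite author's own statement) =====
-- stated objective: alternative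
-- what changed: A collects candidate boundary indices and then, for each candidate from latest to earliest, rescans the tail of the list for a later 'processing' entry (nested scans, quadratic in the worst case); B uses two flat passes: one computing the last 'processing' index M, one picking the latest candidate index strictly below M, with the same fallbacks (last candidate, else 0). On typical inputs A's rescan exits early, so no speed-up was measured.
import Mathlib
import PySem

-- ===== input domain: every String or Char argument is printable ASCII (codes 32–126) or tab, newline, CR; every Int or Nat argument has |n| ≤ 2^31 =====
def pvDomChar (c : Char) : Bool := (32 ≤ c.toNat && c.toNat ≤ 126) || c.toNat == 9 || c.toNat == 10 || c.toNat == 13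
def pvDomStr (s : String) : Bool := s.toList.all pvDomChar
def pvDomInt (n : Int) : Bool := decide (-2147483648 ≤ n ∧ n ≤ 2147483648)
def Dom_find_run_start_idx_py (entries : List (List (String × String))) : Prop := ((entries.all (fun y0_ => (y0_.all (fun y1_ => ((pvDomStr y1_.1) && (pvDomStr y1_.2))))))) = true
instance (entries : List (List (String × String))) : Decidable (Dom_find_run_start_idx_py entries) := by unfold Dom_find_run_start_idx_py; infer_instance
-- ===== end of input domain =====

-- B replaces A's candidate-list-plus-rescan structure by two flat passes: one computing
-- the last 'processing' index M, one picking the latest candidate index below M.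

-- ===== PORT A =====
-- e.get("event", "")
def pvEventA (e : List (String × String)) : String :=
  PySem.Dict.getD (PySem.Dict.mk e) "event" ""

-- '"Pipeline started" in ev or "webhook_received" in ev'
def pvIsCandA (e : List (String × String)) : Bool :=
  let ev := pvEventA e
  PySem.Str.isIn "Pipeline started" ev || PySem.Str.isIn "webhook_received" ev

-- the body of A's inner loop on one entry 'after': the two early-return tests, in order
def pvAfterA (after : List (String × String)) : Bool :=
  if PySem.Dict.get? (PySem.Dict.mk after) "source" == some "agent" then true
  else
    let ev := pvEventA after
    ev == "processing_started" || PySem.Str.isIn "Pipeline" ev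

-- 'for j in range(idx+1, len(entries)): …' with its early returns
def pvInnerA (entries : List (List (String × String))) : List Int → Bool
  | [] => false
  | j :: rest =>
    let after := PySem.List.pyGetD entries j []
    if pvAfterA after then true else pvInnerA entries rest

-- 'for idx in reversed(candidates): …' (some idx = 'return idx' fired)
def pvLoopA (entries : List (List (String × String))) : List Int → Option Int
  | [] => none
  | idx :: rest =>
    if pvInnerA entries (PySem.List.pyRange (idx + 1) (entries.length : Int) 1) then some idx
    else pvLoopA entries rest

def find_run_start_idx_py (entries : List (List (String × String))) : Int :=
  let candidates : List Int :=
    (PySem.List.enumerate entries 0).foldl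
      (fun acc ie => if pvIsCandA ie.2 then acc ++ [ie.1] else acc) []
  if candidates = [] then 0
  else
    match pvLoopA entries candidates.reverse with
    | some idx => idx
    | none => candidates.getLastD 0   -- candidates[-1]; guarded nonempty

-- ===== PORT B =====
def pvMatchB (e : List (String × String)) : Bool :=
  let ev := PySem.Dict.getD (PySem.Dict.mk e) "event" ""
  PySem.Dict.get? (PySem.Dict.mk e) "source" == some "agent"
    || ev == "processing_started" || PySem.Str.isIn "Pipeline" ev

def pvCandB (e : List (String × String)) : Bool :=
  let ev := PySem.Dict.getD (PySem.Dict.mk e) "event" ""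
  PySem.Str.isIn "Pipeline started" ev || PySem.Str.isIn "webhook_received" ev

def find_run_start_idx_py_alt (entries : List (List (String × String))) : Int :=
  let M : Int :=
    (PySem.List.enumerate entries 0).foldl
      (fun m ie => if pvMatchB ie.2 then ie.1 else m) (-1)
  let p : Int × Int :=
    (PySem.List.enumerate entries 0).foldl
      (fun st ie => if pvCandB ie.2 then (ie.1, if ie.1 < M then ie.1 else st.2) else st)
      (-1, -1)
  if p.1 = -1 then 0 else if p.2 ≠ -1 then p.2 else p.1

-- ===== PRECONDITION & SPEC =====
def Spec_find_run_start_idx_py (entries : List (List (String × String))) (out : Int) : Prop := out = find_run_start_idx_py_alt entries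
instance (entries : List (List (String × String))) (out : Int) : Decidable (Spec_find_run_start_idx_py entries out) := by unfold Spec_find_run_start_idx_py; infer_instance

-- ===== CLAIM (what is proved, stated in full; the proofs are below) =====
def Claim_equal_find_run_start_idx_py : Prop := ∀ (entries : List (List (String × String))), Dom_find_run_start_idx_py entries → Spec_find_run_start_idx_py entries (find_run_start_idx_py entries)


-- ===== LEMMAS AND PROOFS =====

theorem pvAfterA_eq (e : List (String × String)) : pvAfterA e = pvMatchB e := by
  unfold pvAfterA pvMatchB pvEventA
  cases h : (PySem.Dict.get? (PySem.Dict.mk e) "source" == some "agent") <;>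
    simp [h, Bool.or_assoc]

theorem pvIsCandA_eq : pvIsCandA = pvCandB := rfl

-- B's first fold: 'i < M' holds iff some later matching index exists (or no match and i < init)
theorem foldM_lt_iff (l : List (List (String × String))) : ∀ (s m i : Int),
    (i < (PySem.List.enumerate l s).foldl (fun m ie => if pvMatchB ie.2 then ie.1 else m) m)
    ↔ ((∃ (k : Nat) (_ : k < l.length), pvMatchB l[k] ∧ i < s + k)
       ∨ ((∀ (k : Nat) (_ : k < l.length), ¬ pvMatchB l[k]) ∧ i < m)) := by
  induction l with
  | nil => intro s m i; simp [PySem.List.enumerate_nil]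
  | cons x tl ih =>
    intro s m i
    rw [PySem.List.enumerate_cons]
    simp only [List.foldl_cons]
    rw [ih]
    constructor
    · rintro (⟨k, hk, hm, hlt⟩ | ⟨hno, hlt⟩)
      · exact Or.inl ⟨k + 1, by simpa using hk, by simpa using hm, by push_cast; push_cast at hlt; omega⟩
      · by_cases hx : pvMatchB x = true
        · simp only [hx, if_true] at hlt
          exact Or.inl ⟨0, by simp, by simpa using hx, by simpa using hlt⟩
        · simp only [hx, if_false] at hlt
          refine Or.inr ⟨?_, hlt⟩
          rintro (_ | k) hk
          · simpa using hx
          · exact hno k (by simpa using hk)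
    · rintro (⟨k, hk, hm, hlt⟩ | ⟨hno, hlt⟩)
      · match k with
        | 0 =>
          have hx : pvMatchB x = true := by simpa using hm
          have his : i < s := by push_cast at hlt; omega
          by_cases htl : ∃ (k : Nat) (_ : k < tl.length), pvMatchB tl[k] = true
          · obtain ⟨k0, hk0, hm0⟩ := htl
            exact Or.inl ⟨k0, hk0, hm0, by push_cast; omega⟩
          · push_neg at htl
            exact Or.inr ⟨fun k hk => by simpa using htl k hk, by simp [hx]; omega⟩
        | k + 1 =>
          exact Or.inl ⟨k, by simpa using hk, by simpa using hm, by push_cast at hlt ⊢; omega⟩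
      · have hx : ¬ pvMatchB x = true := by simpa using hno 0 (by simp)
        refine Or.inr ⟨fun k hk => hno (k + 1) (by simpa using hk), ?_⟩
        simp [hx, hlt]

-- A's inner loop scans entries[j:] for a match
theorem innerA_iff (entries : List (List (String × String))) : ∀ (j : Nat),
    pvInnerA entries (PySem.List.pyRange (j : Int) (entries.length : Int) 1) = true
    ↔ ∃ (k : Nat) (_ : k < entries.length), j ≤ k ∧ pvMatchB entries[k] = true := by
  intro j
  induction hn : entries.length - j generalizing j with
  | zero =>
    have hj : (entries.length : Int) ≤ (j : Int) := by exact_mod_cast Nat.le_of_sub_eq_zero hn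
    rw [show PySem.List.pyRange (j : Int) (entries.length : Int) 1 = [] from by
      simp [PySem.List.pyRange]; omega]
    simp only [pvInnerA]
    constructor
    · intro h; cases h
    · rintro ⟨k, hk, hjk, _⟩; omega
  | succ n ihn =>
    have hj : j < entries.length := by omega
    rw [PySem.List.pyRange_one_cons (by exact_mod_cast hj)]
    simp only [pvInnerA]
    rw [PySem.List.pyGetD_natCast, List.getD_eq_getElem _ _ hj]
    rw [pvAfterA_eq]
    by_cases hx : pvMatchB entries[j] = true
    · rw [if_pos (by simp [hx])]
      exact ⟨fun _ => ⟨j, hj, le_refl j, hx⟩, fun _ => rfl⟩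
    · rw [if_neg (by simp [hx])]
      rw [show (j : Int) + 1 = ((j + 1 : Nat) : Int) from by push_cast; ring]
      rw [ihn (j + 1) (by omega)]
      constructor
      · rintro ⟨k, hk, hjk, hm⟩; exact ⟨k, hk, by omega, hm⟩
      · rintro ⟨k, hk, hjk, hm⟩
        refine ⟨k, hk, by
          rcases Nat.eq_or_lt_of_le hjk with h | h
          · exact absurd (h ▸ hm) hx
          · omega, hm⟩

theorem loopA_eq_find (entries : List (List (String × String))) (l : List Int) :
    pvLoopA entries l
    = l.find? (fun idx => pvInnerA entries (PySem.List.pyRange (idx + 1) (entries.length : Int) 1)) := by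
  induction l with
  | nil => rfl
  | cons a l ih =>
    simp only [pvLoopA, List.find?_cons]
    by_cases h : pvInnerA entries (PySem.List.pyRange (a + 1) (entries.length : Int) 1) = true
    · simp [h]
    · simp only [Bool.not_eq_true] at h; simp [h, ih]

theorem find?_congr_mem (l : List Int) (p q : Int → Bool) (h : ∀ i ∈ l, p i = q i) :
    l.find? p = l.find? q := by
  induction l with
  | nil => rfl
  | cons a l ih =>
    simp only [List.find?_cons, h a (List.mem_cons_self)]
    exact ih (fun i hi => h i (List.mem_cons_of_mem a hi)) ▸ rfl

theorem foldPair_fst (q : Int → Bool) (l : List Int) :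
    (l.foldl (fun st i => (i, if q i = true then i else st.2)) ((-1 : Int), (-1 : Int))).1
    = l.getLastD (-1) := by
  induction l using List.reverseRecOn with
  | nil => rfl
  | append_singleton l a ih => simp [List.foldl_append]

theorem foldPair_snd (q : Int → Bool) (l : List Int) :
    (l.foldl (fun st i => (i, if q i = true then i else st.2)) ((-1 : Int), (-1 : Int))).2
    = (l.reverse.find? q).getD (-1) := by
  induction l using List.reverseRecOn with
  | nil => rfl
  | append_singleton l a ih =>
    rw [List.foldl_append, List.reverse_append]
    simp only [List.foldl_cons, List.foldl_nil, List.reverse_singleton, List.singleton_append,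
      List.find?_cons]
    by_cases h : q a = true
    · simp [h]
    · simp only [Bool.not_eq_true] at h; simp [h, ih]

theorem final_eq (q : Int → Bool) (l : List Int) (hnn : ∀ i ∈ l, 0 ≤ i) :
    (if l = [] then (0 : Int)
     else match l.reverse.find? q with | some i => i | none => l.getLastD 0)
    = (let p := l.foldl (fun st i => (i, if q i = true then i else st.2)) ((-1 : Int), (-1 : Int));
       if p.1 = -1 then 0 else if p.2 ≠ -1 then p.2 else p.1) := by
  by_cases hl : l = []
  · subst hl; rfl
  · simp only [hl, if_false]
    have h1 : (l.foldl (fun st i => (i, if q i = true then i else st.2)) ((-1:Int), (-1:Int))).1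
        = l.getLastD (-1) := foldPair_fst q l
    have h2 : (l.foldl (fun st i => (i, if q i = true then i else st.2)) ((-1:Int), (-1:Int))).2
        = (l.reverse.find? q).getD (-1) := foldPair_snd q l
    have hlast : ∀ d : Int, l.getLastD d = l.getLast hl := fun d => by
      rw [List.getLastD_eq_getLast?, List.getLast?_eq_getLast hl, Option.getD_some]
    have hlnn : (0 : Int) ≤ l.getLast hl := hnn _ (List.getLast_mem hl)
    simp only [h1, h2, hlast]
    have hne : l.getLast hl ≠ -1 := by omega
    cases hfind : l.reverse.find? q with
    | none => simp [hne, hlast]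
    | some i =>
      have hi : 0 ≤ i := hnn i (by
        have := List.mem_of_find?_eq_some hfind
        exact List.mem_reverse.mp this)
      have : i ≠ -1 := by omega
      simp [hne, this]

theorem bridgeA (entries : List (List (String × String))) (k : Nat) :
    pvInnerA entries (PySem.List.pyRange ((k : Int) + 1) (entries.length : Int) 1)
    = decide ((k : Int) <
        (PySem.List.enumerate entries 0).foldl (fun m ie => if pvMatchB ie.2 then ie.1 else m) (-1)) := by
  rw [show ((k : Int) + 1) = ((k + 1 : Nat) : Int) from by push_cast; ring]
  rw [Bool.eq_iff_iff, innerA_iff, decide_eq_true_iff, foldM_lt_iff]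
  constructor
  · rintro ⟨k', hk', hle, hm⟩
    exact Or.inl ⟨k', hk', hm, by push_cast; omega⟩
  · rintro (⟨k', hk', hm, hlt⟩ | ⟨_, hlt⟩)
    · exact ⟨k', hk', by push_cast at hlt; omega, hm⟩
    · exact absurd hlt (by omega)

theorem memC (entries : List (List (String × String)))
    (pred : Int × List (String × String) → Bool) (i : Int)
    (hi : i ∈ (((PySem.List.enumerate entries 0).filter pred).map (·.1))) :
    ∃ k : Nat, k < entries.length ∧ i = (k : Int) := by
  rcases List.mem_map.mp hi with ⟨ie, hie, rfl⟩
  rcases (PySem.List.mem_enumerate_iff _ _ _).mp (List.mem_of_mem_filter hie) with ⟨k, hk, rfl⟩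
  exact ⟨k, hk, by simp⟩

-- ===== VERDICT (by name: the statement is the Claim_ definition above) =====
theorem find_run_start_idx_py_spec : Claim_equal_find_run_start_idx_py := by
  intro entries _
  show find_run_start_idx_py entries = find_run_start_idx_py_alt entries
  simp only [find_run_start_idx_py, find_run_start_idx_py_alt, loopA_eq_find]
  set M : Int := (PySem.List.enumerate entries 0).foldl
      (fun m ie => if pvMatchB ie.2 then ie.1 else m) (-1) with hM
  rw [PySem.List.foldl_append_if (fun ie : Int × List (String × String) => pvIsCandA ie.2)
      (fun ie : Int × List (String × String) => ie.1) (PySem.List.enumerate entries 0) []]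
  simp only [List.nil_append, pvIsCandA_eq]
  rw [← List.foldl_filter (p := fun ie : Int × List (String × String) => pvCandB ie.2)
      (f := fun (st : Int × Int) (ie : Int × List (String × String)) =>
        (ie.1, if ie.1 < M then ie.1 else st.2))]
  rw [← List.foldl_map (f := fun ie : Int × List (String × String) => ie.1)
      (g := fun (st : Int × Int) (i : Int) => (i, if i < M then i else st.2))]
  set C : List Int :=
    ((PySem.List.enumerate entries 0).filter (fun ie => pvCandB ie.2)).map (·.1) with hC
  have hmem : ∀ i ∈ C, ∃ k : Nat, k < entries.length ∧ i = (k : Int) := fun i hi =>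
    memC entries _ i (hC ▸ hi)
  have hnn : ∀ i ∈ C, (0 : Int) ≤ i := by
    intro i hi; rcases hmem i hi with ⟨k, _, rfl⟩; positivity
  rw [find?_congr_mem C.reverse _ (fun i => decide (i < M)) (by
    intro i hi
    rcases hmem i (List.mem_reverse.mp hi) with ⟨k, _, rfl⟩
    exact hM ▸ bridgeA entries k)]
  have hfin := final_eq (fun i => decide (i < M)) C hnn
  simp only [decide_eq_true_eq] at hfin
  exact hfin
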